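-- pv_equiv track=rewrite | github.com/robice1/COSC262 | lab2.py | my_enumerate
-- ===== SOURCE A (Python) =====
-- def my_enumerate(items, start_index = 0):
--     """returns a list of tuples (i, item) where item is the ith item"""
--     result = []
--     if start_index >= len(items):
--         return result
--     else:
--         a_tuple = (start_index, items[start_index])
--         result.append(a_tuple)
--         result += my_enumerate(items, start_index + 1)
--         return result
-- ===== SOURCE B (Python) =====
-- def my_enumerate(items, start_index = 0):
--     """returns a list of tuples (i, item) where item is the ith item"""
--     result = []
--     for i in range(start_index, len(items)):
--         result.append((i, items[i]))
--     return result
-- ===== Notes on version B (the rewrite author's own statement) =====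
-- stated objective: faster
-- what changed: Replaces A's index recursion (which rebuilds the result by concatenating each recursive suffix) with a single flat iterative loop over range(start_index, len(items)) appending to one accumulator list.
import Mathlib
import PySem

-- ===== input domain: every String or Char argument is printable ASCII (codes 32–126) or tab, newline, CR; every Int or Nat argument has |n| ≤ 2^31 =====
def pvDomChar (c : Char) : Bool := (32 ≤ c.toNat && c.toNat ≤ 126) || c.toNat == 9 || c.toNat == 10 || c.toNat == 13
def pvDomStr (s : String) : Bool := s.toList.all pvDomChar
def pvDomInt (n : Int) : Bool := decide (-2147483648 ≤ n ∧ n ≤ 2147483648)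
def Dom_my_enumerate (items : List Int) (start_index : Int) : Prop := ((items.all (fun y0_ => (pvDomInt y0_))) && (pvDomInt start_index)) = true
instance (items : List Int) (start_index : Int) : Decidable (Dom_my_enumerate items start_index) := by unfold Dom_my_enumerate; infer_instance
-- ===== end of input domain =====

-- B replaces A's index recursion by a flat iterative loop over range(start_index, len(items)); same values, same order.

-- ===== PORT A =====
-- items[start_index] is pyGetD (total form); exact under Pre_ (Raise.InRange holds there).
def my_enumerate (items : List Int) (start_index : Int) : List (Int × Int) :=
  if (items.length : Int) ≤ start_index then []
  else (start_index, PySem.List.pyGetD items start_index 0) :: my_enumerate items (start_index + 1)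
termination_by ((items.length : Int) - start_index).toNat
decreasing_by omega

-- ===== PORT B =====
-- the loop 'for i in range(start_index, len(items)): result.append((i, items[i]))'
def my_enumerate_alt (items : List Int) (start_index : Int) : List (Int × Int) :=
  (PySem.List.pyRange start_index (items.length : Int) 1).foldl
    (fun result i => result ++ [(i, PySem.List.pyGetD items i 0)]) []

-- ===== PRECONDITION & SPEC =====
-- Pre_ excludes exactly the inputs where the Python A raises IndexError
-- (start_index below -len(items) and below len(items)); B raises there too.
def Pre_my_enumerate (items : List Int) (start_index : Int) : Prop :=
  -(items.length : Int) ≤ start_index ∨ (items.length : Int) ≤ start_index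
instance (items : List Int) (start_index : Int) : Decidable (Pre_my_enumerate items start_index) := by
  unfold Pre_my_enumerate; infer_instance

def pvWitness_my_enumerate : List Int × Int := ([3, 1, 4], -2)

def Spec_my_enumerate (items : List Int) (start_index : Int) (out : List (Int × Int)) : Prop := out = my_enumerate_alt items start_index
instance (items : List Int) (start_index : Int) (out : List (Int × Int)) : Decidable (Spec_my_enumerate items start_index out) := by unfold Spec_my_enumerate; infer_instance

-- ===== CLAIM (what is proved, stated in full; the proofs are below) =====
def Claim_equal_my_enumerate : Prop := ∀ (items : List Int) (start_index : Int), Dom_my_enumerate items start_index → Pre_my_enumerate items start_index → Spec_my_enumerate items start_index (my_enumerate items start_index)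

-- ===== LEMMAS AND PROOFS =====

-- the foldl-append loop is a map over the range
theorem foldl_append_map {α β : Type} (f : α → β) (l : List α) (acc : List β) :
    l.foldl (fun r i => r ++ [f i]) acc = acc ++ l.map f := by
  induction l generalizing acc with
  | nil => simp
  | cons x xs ih => simp [List.foldl, ih]

theorem my_enumerate_eq_map (items : List Int) (s : Int) :
    my_enumerate items s =
      (PySem.List.pyRange s (items.length : Int) 1).map
        (fun i => (i, PySem.List.pyGetD items i 0)) := by
  rw [my_enumerate]
  split
  · rw [PySem.List.pyRange_one_eq_nil (by omega)]; rfl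
  · rw [PySem.List.pyRange_one_cons (by omega), List.map_cons,
      my_enumerate_eq_map items (s + 1)]
termination_by ((items.length : Int) - s).toNat
decreasing_by omega

-- ===== VERDICT (by name: the statement is the Claim_ definition above) =====
theorem my_enumerate_spec : Claim_equal_my_enumerate := by
  intro items s _ _
  unfold Spec_my_enumerate my_enumerate_alt
  rw [foldl_append_map, List.nil_append, my_enumerate_eq_map]
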